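-- pv_equiv track=rewrite | github.com/kythuatdulieu/Cypher2Sql | graphiti/pipeline/reduce_sql.py | table_equivalent
-- ===== SOURCE A (Python) =====
-- from collections import Counter
-- from typing import Iterable, List, Optional, Sequence, Tuple, Set
--
-- Row = Tuple
--
-- def table_equivalent(rows1: Sequence[Row], rows2: Sequence[Row]) -> bool:
--     """Kiểm tra hai bảng có tương đương theo nghĩa bag và bỏ qua thứ tự cột."""
--
--     if not rows1 and not rows2:
--         return True
--     if len(rows1) != len(rows2):
--         return False
--     if not rows1:
--         return True
--     len_cols = len(rows1[0])
--     if any(len(row) != len_cols for row in rows1):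
--         raise ValueError("rows1 không đồng nhất số cột")
--     if any(len(row) != len_cols for row in rows2):
--         raise ValueError("rows2 không đồng nhất số cột")
--
--     sig1 = [column_signature(rows1, idx) for idx in range(len_cols)]
--     sig2 = [column_signature(rows2, idx) for idx in range(len_cols)]
--     mapping = greedy_match_by_signature(sig1, sig2)
--     if mapping is not None:
--         return bags_equal(rows1, apply_perm(rows2, mapping))
--
--     # fallback: thử tất cả hoán vị có thể khi chữ ký trùng nhau
--     for perm in generate_candidate_perms(sig1, sig2):
--         if bags_equal(rows1, apply_perm(rows2, perm)):
--             return True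
--     return False
--
-- def column_signature(rows: Sequence[Row], idx: int) -> Counter:
--     """Chữ ký cột = Counter giá trị (kể cả None) để hỗ trợ ghép cột."""
--
--     return Counter(row[idx] for row in rows)
--
-- def greedy_match_by_signature(sig1: Sequence[Counter], sig2: Sequence[Counter]) -> Optional[List[int]]:
--     """Ghép nhanh dựa trên chữ ký duy nhất."""
--
--     mapping: List[Optional[int]] = [None] * len(sig1)
--     used: Set[int] = set()
--     for idx, sig in enumerate(sig1):
--         candidates = [j for j, sig_other in enumerate(sig2) if sig_other == sig and j not in used]
--         if len(candidates) == 1: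
--             mapping[idx] = candidates[0]
--             used.add(candidates[0])
--     if all(m is not None for m in mapping):
--         return [m for m in mapping if m is not None]
--     return None
--
-- def generate_candidate_perms(sig1: Sequence[Counter], sig2: Sequence[Counter]) -> Iterable[Tuple[int, ...]]:
--     """Sinh các hoán vị phù hợp chữ ký."""
--
--     indices = list(range(len(sig1)))
--     # Chỉ giữ những ghép mà chữ ký tồn tại
--     possible_positions = []
--     for sig in sig1:
--         positions = [idx for idx, sig_other in enumerate(sig2) if sig_other == sig]
--         if not positions:
--             return []
--         possible_positions.append(positions)
--
--     # backtracking đơn giản (giảm nhanh nhánh khi trùng lặp)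
--     def backtrack(pos: int, current: List[int], used: Set[int]) -> Iterable[Tuple[int, ...]]:
--         if pos == len(indices):
--             yield tuple(current)
--             return
--         for candidate in possible_positions[pos]:
--             if candidate in used:
--                 continue
--             used.add(candidate)
--             current.append(candidate)
--             yield from backtrack(pos + 1, current, used)
--             current.pop()
--             used.remove(candidate)
--
--     return backtrack(0, [], set())
--
-- def apply_perm(rows: Sequence[Row], perm: Sequence[int]) -> List[Row]:
--     """Áp dụng hoán vị cột."""
--
--     return [tuple(row[idx] for idx in perm) for row in rows]
--
-- def bags_equal(rows1: Sequence[Row], rows2: Sequence[Row]) -> bool: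
--     """So sánh hai multiset."""
--
--     return Counter(rows1) == Counter(rows2)
-- ===== SOURCE B (Python) =====
-- from collections import Counter
-- from itertools import permutations
--
--
-- def table_equivalent(rows1, rows2):
--     """Kiểm tra hai bảng có tương đương theo nghĩa bag và bỏ qua thứ tự cột."""
--
--     if not rows1 and not rows2:
--         return True
--     if len(rows1) != len(rows2):
--         return False
--     if not rows1:
--         return True
--     len_cols = len(rows1[0])
--     if any(len(row) != len_cols for row in rows1):
--         raise ValueError("rows1 không đồng nhất số cột")
--     if any(len(row) != len_cols for row in rows2):
--         raise ValueError("rows2 không đồng nhất số cột")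
--
--     sig1 = [Counter(row[i] for row in rows1) for i in range(len_cols)]
--     sig2 = [Counter(row[i] for row in rows2) for i in range(len_cols)]
--     # table-2 column positions whose signature matches each table-1 column
--     possible = [[j for j, t in enumerate(sig2) if t == s] for s in sig1]
--     # columns sharing one candidate list are interchangeable: assign them per
--     # group with itertools.permutations instead of backtracking column by column
--     groups = {}
--     for i, ps in enumerate(possible):
--         groups.setdefault(tuple(ps), []).append(i)
--     items = list(groups.items())
--     if any(len(idxs) > len(ps) for ps, idxs in items):
--         return False  # pigeonhole: such a group cannot be mapped injectively
--     target = Counter(rows1)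
--     perm = [0] * len_cols
--
--     def search(k):
--         if k == len(items):
--             return len(set(perm)) == len_cols and target == Counter(
--                 tuple(row[j] for j in perm) for row in rows2
--             )
--         ps, idxs = items[k]
--         for assigned in permutations(ps):
--             for i, j in zip(idxs, assigned):
--                 perm[i] = j
--             if search(k + 1):
--                 return True
--         return False
--
--     return search(0)
-- ===== Notes on version B (the rewrite author's own statement) =====
-- stated objective: faster
-- what changed: Deletes the greedy unique-signature fast path (provably subsumed by the exhaustive search), groups interchangeable columns by their list of signature-matching table-2 positions, rejects by pigeonhole when a group is larger than its candidate list, and assigns whole groups via itertools.permutations in a recursive search instead of backtracking column by column.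
import Mathlib
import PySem

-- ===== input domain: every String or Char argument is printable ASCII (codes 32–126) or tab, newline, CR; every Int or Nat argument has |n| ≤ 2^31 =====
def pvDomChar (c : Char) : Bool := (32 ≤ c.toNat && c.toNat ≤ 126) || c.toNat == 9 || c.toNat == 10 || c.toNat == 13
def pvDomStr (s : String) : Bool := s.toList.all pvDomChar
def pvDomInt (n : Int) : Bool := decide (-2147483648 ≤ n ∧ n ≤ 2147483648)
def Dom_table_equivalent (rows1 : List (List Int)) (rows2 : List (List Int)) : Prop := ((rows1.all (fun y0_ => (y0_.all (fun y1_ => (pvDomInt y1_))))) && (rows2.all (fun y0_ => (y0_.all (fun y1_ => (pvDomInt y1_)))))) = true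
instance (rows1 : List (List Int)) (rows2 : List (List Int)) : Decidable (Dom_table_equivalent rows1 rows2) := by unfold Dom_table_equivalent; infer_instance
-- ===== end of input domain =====

-- B deletes A's greedy unique-signature fast path (subsumed by the exhaustive search, as proved
-- below) and replaces the per-column backtracking by a per-group permutation search over columns
-- grouped by their candidate lists; a timing run measured B faster by a constant factor.

-- Shared semantic helper: Python's '==' on two dicts/Counters (order-insensitive: same size and
-- every key of d has the same value in e); exact for dicts with distinct keys, which all Dicts
-- built by PySem operations have.
def dictEq {κ ν : Type} [BEq κ] [BEq ν] (d e : PySem.Dict κ ν) : Bool :=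
  d.size == e.size && d.items.all (fun p => e.get? p.1 == some p.2)

-- The comprehension '[j for j, t in enumerate(sig2) if t == s]' appearing verbatim in both
-- sources (A: generate_candidate_perms; B: the 'possible' list).
def positions (sig2 : List (PySem.Dict Int Int)) (s : PySem.Dict Int Int) : List Int :=
  (PySem.List.enumerate sig2).foldl (fun acc q => if dictEq q.2 s then acc ++ [q.1] else acc) []

-- ===== PORT A =====

def column_signature (rows : List (List Int)) (idx : Int) : PySem.Dict Int Int :=
  -- Counter(row[idx] for row in rows); row[idx] is in range on every admitted call
  PySem.Dict.counter (rows.map (fun row => PySem.List.pyGetD row idx 0))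

def greedy_match_by_signature (sig1 sig2 : List (PySem.Dict Int Int)) : Option (List Int) :=
  let st := (PySem.List.enumerate sig1).foldl
    (fun st p =>
      let candidates := (PySem.List.enumerate sig2).foldl
        (fun acc q => if dictEq q.2 p.2 && !(PySem.Set.contains st.2 q.1) then acc ++ [q.1] else acc) []
      if candidates.length == 1 then
        -- candidates[0]: candidates is nonempty here (length == 1), so headD is exact
        (st.1.set p.1.toNat (some (candidates.headD 0)), PySem.Set.add st.2 (candidates.headD 0))
      else st)
    (List.replicate sig1.length (none : Option Int), PySem.Set.empty)
  if st.1.all (fun m => m.isSome) then some (st.1.filterMap (fun m => m)) else none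

-- the inner generator function 'backtrack' of generate_candidate_perms (yields become list append)
def backtrack (poss : List (List Int)) (used : PySem.Set Int) : List (List Int) :=
  match poss with
  | [] => [[]]
  | ps :: rest =>
    ps.foldl (fun acc c =>
      if PySem.Set.contains used c then acc
      else acc ++ (backtrack rest (PySem.Set.add used c)).map (fun t => c :: t)) []

-- the 'possible_positions' loop with its early 'return []' (ported as the None short-circuit)
def buildPossible (sig2 : List (PySem.Dict Int Int)) : List (PySem.Dict Int Int) → Option (List (List Int))
  | [] => some []
  | s :: rest =>
    let ps := positions sig2 s
    if ps.isEmpty then none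
    else (buildPossible sig2 rest).map (fun ls => ps :: ls)

def generate_candidate_perms (sig1 sig2 : List (PySem.Dict Int Int)) : List (List Int) :=
  match buildPossible sig2 sig1 with
  | none => []
  | some poss => backtrack poss PySem.Set.empty

def apply_perm (rows : List (List Int)) (perm : List Int) : List (List Int) :=
  rows.map (fun row => perm.map (fun idx => PySem.List.pyGetD row idx 0))

def bags_equal (rows1 rows2 : List (List Int)) : Bool :=
  dictEq (PySem.Dict.counter rows1) (PySem.Dict.counter rows2)

def table_equivalent (rows1 : List (List Int)) (rows2 : List (List Int)) : Bool :=
  if rows1.isEmpty && rows2.isEmpty then true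
  else if rows1.length != rows2.length then false
  else if rows1.isEmpty then true
  else
    let len_cols : Int := ((rows1.headD []).length : Int)
    if rows1.any (fun row => (row.length : Int) != len_cols) then false   -- Python: raise ValueError (excluded by Pre_)
    else if rows2.any (fun row => (row.length : Int) != len_cols) then false -- Python: raise ValueError (excluded by Pre_)
    else
      let sig1 := (PySem.List.pyRange 0 len_cols).map (fun idx => column_signature rows1 idx)
      let sig2 := (PySem.List.pyRange 0 len_cols).map (fun idx => column_signature rows2 idx)
      match greedy_match_by_signature sig1 sig2 with
      | some mapping => bags_equal rows1 (apply_perm rows2 mapping)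
      | none => (generate_candidate_perms sig1 sig2).any (fun perm => bags_equal rows1 (apply_perm rows2 perm))

-- ===== PORT B =====

-- the inner recursive function 'search' of B (the closure parameters become arguments;
-- Python's in-place writes to perm thread through as a functional update)
def searchB (rows2 : List (List Int)) (target : PySem.Dict (List Int) Int) (len_cols : Int) :
    List (List Int × List Int) → List Int → Bool
  | [], perm =>
      (((PySem.Set.ofList perm).length : Int) == len_cols) &&
        dictEq target (PySem.Dict.counter (rows2.map (fun row => perm.map (fun j => PySem.List.pyGetD row j 0))))
  | it :: rest, perm =>
      (PySem.List.permutations it.1 it.1.length).any (fun assigned =>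
        searchB rows2 target len_cols rest ((it.2.zip assigned).foldl (fun a ij => a.set ij.1.toNat ij.2) perm))

def table_equivalent_alt (rows1 : List (List Int)) (rows2 : List (List Int)) : Bool :=
  if rows1.isEmpty && rows2.isEmpty then true
  else if rows1.length != rows2.length then false
  else if rows1.isEmpty then true
  else
    let len_cols : Int := ((rows1.headD []).length : Int)
    if rows1.any (fun row => (row.length : Int) != len_cols) then false   -- Python: raise ValueError (excluded by Pre_)
    else if rows2.any (fun row => (row.length : Int) != len_cols) then false -- Python: raise ValueError (excluded by Pre_)
    else
      let sig1 := (PySem.List.pyRange 0 len_cols).map (fun i => PySem.Dict.counter (rows1.map (fun row => PySem.List.pyGetD row i 0)))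
      let sig2 := (PySem.List.pyRange 0 len_cols).map (fun i => PySem.Dict.counter (rows2.map (fun row => PySem.List.pyGetD row i 0)))
      let possible := sig1.map (fun s => positions sig2 s)
      -- groups.setdefault(tuple(ps), []).append(i)
      let d := (PySem.List.enumerate possible).foldl
        (fun d q => d.modify q.2 [] (fun v => v ++ [q.1]))
        (PySem.Dict.empty : PySem.Dict (List Int) (List Int))
      let items := d.items
      if items.any (fun it => decide (it.1.length < it.2.length)) then false
      else
        let target := PySem.Dict.counter rows1
        searchB rows2 target len_cols items (List.replicate len_cols.toNat 0)

-- ===== PRECONDITION & SPEC =====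

-- Pre_ excludes exactly the inputs on which the Python raises ValueError: both tables nonempty
-- this guard is reached only when rows1 ≠ [] and the lengths agree, and there it requires every
-- row of both tables to have the width of rows1[0] (both Pythons raise identically there).
def Pre_table_equivalent (rows1 : List (List Int)) (rows2 : List (List Int)) : Prop :=
  rows1 ≠ [] → rows1.length = rows2.length →
    ((∀ r ∈ rows1, r.length = (rows1.headD []).length) ∧ (∀ r ∈ rows2, r.length = (rows1.headD []).length))
instance (rows1 : List (List Int)) (rows2 : List (List Int)) : Decidable (Pre_table_equivalent rows1 rows2) := by
  unfold Pre_table_equivalent; infer_instance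

def pvWitness_table_equivalent : List (List Int) × List (List Int) :=
  ([[1, 2], [3, 4]], [[2, 1], [4, 3]])

def Spec_table_equivalent (rows1 : List (List Int)) (rows2 : List (List Int)) (out : Bool) : Prop := out = table_equivalent_alt rows1 rows2
instance (rows1 : List (List Int)) (rows2 : List (List Int)) (out : Bool) : Decidable (Spec_table_equivalent rows1 rows2 out) := by unfold Spec_table_equivalent; infer_instance

-- ===== CLAIM (what is proved, stated in full; the proofs are below) =====
def Claim_equal_table_equivalent : Prop := ∀ (rows1 : List (List Int)) (rows2 : List (List Int)), Dom_table_equivalent rows1 rows2 → Pre_table_equivalent rows1 rows2 → Spec_table_equivalent rows1 rows2 (table_equivalent rows1 rows2)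

-- ===== LEMMAS AND PROOFS =====

-- the full cartesian product of the candidate lists (proof-side reference enumeration)
def prodAll : List (List Int) → List (List Int)
  | [] => [[]]
  | g :: rest => g.flatMap (fun x => (prodAll rest).map (fun t => x :: t))

-- mapping values produced by the greedy pass, recast as a structural recursion over the
-- per-column candidate lists (first component: the mapping entries, second: the final used set)
def grM (poss : List (List Int)) (used : PySem.Set Int) : List (Option Int) × PySem.Set Int :=
  match poss with
  | [] => ([], used)
  | ps :: rest =>
    let cs := ps.filter (fun j => !(PySem.Set.contains used j))
    if cs.length == 1 then
      let c := cs.headD 0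
      let r := grM rest (PySem.Set.add used c)
      (some c :: r.1, r.2)
    else
      let r := grM rest used
      (none :: r.1, r.2)

lemma cands_eq (sig2 : List (PySem.Dict Int Int)) (s : PySem.Dict Int Int) (used : PySem.Set Int) :
    (PySem.List.enumerate sig2).foldl
      (fun acc q => if dictEq q.2 s && !(PySem.Set.contains used q.1) then acc ++ [q.1] else acc) []
    = (positions sig2 s).filter (fun j => !(PySem.Set.contains used j)) := by
  rw [positions, PySem.List.foldl_append_if (p := fun q => dictEq q.2 s && !(PySem.Set.contains used q.1)) (f := Prod.fst),
      PySem.List.foldl_append_if (p := fun q => dictEq q.2 s) (f := Prod.fst)]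
  simp [List.filter_map, List.filter_filter, Function.comp]
  congr 1
  apply List.filter_congr
  intro q _
  simp [Bool.and_comm]

lemma greedy_fold (sig2 : List (PySem.Dict Int Int)) :
    ∀ (todo : List (PySem.Dict Int Int)) (k : Nat) (m0 : List (Option Int)) (used : PySem.Set Int),
    m0.length = k →
    (PySem.List.enumerate todo (k : Int)).foldl
      (fun st p =>
        let candidates := (PySem.List.enumerate sig2).foldl
          (fun acc q => if dictEq q.2 p.2 && !(PySem.Set.contains st.2 q.1) then acc ++ [q.1] else acc) []
        if candidates.length == 1 then
          (st.1.set p.1.toNat (some (candidates.headD 0)), PySem.Set.add st.2 (candidates.headD 0))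
        else st)
      (m0 ++ List.replicate todo.length (none : Option Int), used)
    = (m0 ++ (grM (todo.map (positions sig2)) used).1, (grM (todo.map (positions sig2)) used).2) := by
  intro todo
  induction todo with
  | nil => intro k m0 used hk; simp [PySem.List.enumerate, grM]
  | cons s rest ih =>
    intro k m0 used hk
    rw [show PySem.List.enumerate (s :: rest) (k : Int) = ((k : Int), s) :: PySem.List.enumerate rest ((k : Int) + 1) from rfl]
    rw [List.foldl_cons]
    simp only [cands_eq sig2 s used]
    rw [List.map_cons, grM]
    have hlen : (s :: rest).length = rest.length + 1 := rfl
    rw [hlen]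
    split
    case isTrue hl =>
      rw [show ((k : Int)).toNat = m0.length by simp [hk]]
      rw [List.set_append_right _ _ (le_refl _)]
      rw [Nat.sub_self, List.replicate_succ, List.set_cons_zero]
      have : m0 ++ some ((List.filter (fun j => !(PySem.Set.contains used j)) (positions sig2 s)).headD 0) :: List.replicate rest.length none
           = (m0 ++ [some ((List.filter (fun j => !(PySem.Set.contains used j)) (positions sig2 s)).headD 0)]) ++ List.replicate rest.length none := by
        simp
      rw [this]
      have hcast : (k : Int) + 1 = ((k + 1 : Nat) : Int) := by push_cast; ring
      rw [hcast]
      rw [ih (k+1) _ _ (by simp [hk])]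
      simp
    case isFalse hl =>
      have : m0 ++ List.replicate (rest.length + 1) (none : Option Int)
           = (m0 ++ [none]) ++ List.replicate rest.length none := by
        rw [List.replicate_succ]
        simp
      rw [this]
      have hcast : (k : Int) + 1 = ((k + 1 : Nat) : Int) := by push_cast; ring
      rw [hcast]
      rw [ih (k+1) _ _ (by simp [hk])]
      simp

lemma greedy_eq_grM (sig1 sig2 : List (PySem.Dict Int Int)) :
    greedy_match_by_signature sig1 sig2 =
      (let m := (grM (sig1.map (positions sig2)) PySem.Set.empty).1
       if m.all (fun o => o.isSome) then some (m.filterMap (fun o => o)) else none) := by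
  have h := greedy_fold sig2 sig1 0 [] PySem.Set.empty rfl
  simp only [List.nil_append, Nat.cast_zero] at h
  unfold greedy_match_by_signature
  dsimp only
  rw [h]

lemma filter_one {ps : List Int} {used : PySem.Set Int}
    (h : ((ps.filter (fun j => !(PySem.Set.contains used j))).length == 1) = true) :
    ps.filter (fun j => !(PySem.Set.contains used j))
      = [(ps.filter (fun j => !(PySem.Set.contains used j))).headD 0] := by
  rcases List.length_eq_one_iff.mp (beq_iff_eq.mp h) with ⟨c, hc⟩
  rw [hc]; rfl

lemma mem_of_mem_filter_used {ps : List Int} {used : PySem.Set Int} {c : Int}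
    (h : c ∈ ps.filter (fun j => !(PySem.Set.contains used j))) : c ∈ ps ∧ c ∉ used := by
  rcases List.mem_filter.mp h with ⟨h1, h2⟩
  refine ⟨h1, ?_⟩
  simpa [PySem.Set.contains_iff] using h2

lemma grM_sound : ∀ (poss : List (List Int)) (used : PySem.Set Int) (m : List Int),
    (grM poss used).1 = m.map some →
    List.Forall₂ (fun c ps => c ∈ ps) m poss ∧ m.Nodup ∧ ∀ x ∈ m, x ∉ used := by
  intro poss
  induction poss with
  | nil =>
    intro used m h
    simp only [grM] at h
    cases m with
    | nil => simp
    | cons a t => simp at h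
  | cons ps rest ih =>
    intro used m h
    rw [grM] at h
    split at h
    case isTrue hl =>
      cases m with
      | nil => simp at h
      | cons m0 mt =>
        simp only [List.map_cons, List.cons.injEq, Option.some.injEq] at h
        obtain ⟨hm0, hmt⟩ := h
        have hcmem : (ps.filter (fun j => !(PySem.Set.contains used j))).headD 0
            ∈ ps.filter (fun j => !(PySem.Set.contains used j)) := by
          rw [filter_one hl]; exact List.mem_singleton.mpr rfl
        obtain ⟨hps, hused⟩ := mem_of_mem_filter_used hcmem
        obtain ⟨hf, hnd, hu⟩ := ih _ mt hmt
        subst hm0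
        refine ⟨List.Forall₂.cons hps hf, ?_, ?_⟩
        · refine List.nodup_cons.mpr ⟨?_, hnd⟩
          intro hmem
          exact (hu _ hmem) (by rw [PySem.Set.mem_add]; right; rfl)
        · intro x hx
          rcases List.mem_cons.mp hx with rfl | hx
          · exact hused
          · intro hxu
            exact (hu x hx) (by rw [PySem.Set.mem_add]; left; exact hxu)
    case isFalse hl =>
      cases m with
      | nil => simp at h
      | cons m0 mt => simp at h

lemma grM_unique : ∀ (poss : List (List Int)) (used : PySem.Set Int) (m : List Int),
    (grM poss used).1 = m.map some →
    ∀ p, List.Forall₂ (fun c ps => c ∈ ps) p poss → p.Nodup →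
      (∀ x ∈ p, x ∉ used) → p = m := by
  intro poss
  induction poss with
  | nil =>
    intro used m h p hf _ _
    rw [List.forall₂_nil_right_iff] at hf
    simp only [grM] at h
    cases m with
    | nil => exact hf
    | cons a t => simp at h
  | cons ps rest ih =>
    intro used m h p hf hnd hu
    rw [grM] at h
    split at h
    case isTrue hl =>
      cases m with
      | nil => simp at h
      | cons m0 mt =>
        simp only [List.map_cons, List.cons.injEq, Option.some.injEq] at h
        obtain ⟨hm0, hmt⟩ := h
        cases hf with
        | cons hx hf' =>
          rename_i x t
          have hxcs : x ∈ ps.filter (fun j => !(PySem.Set.contains used j)) := by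
            rw [List.mem_filter]
            refine ⟨hx, ?_⟩
            simpa [PySem.Set.contains_iff] using hu x List.mem_cons_self
          rw [filter_one hl] at hxcs
          have hxc : x = (ps.filter (fun j => !(PySem.Set.contains used j))).headD 0 :=
            List.mem_singleton.mp hxcs
          have ht : t = mt := by
            refine ih _ mt hmt t hf' (List.nodup_cons.mp hnd).2 ?_
            intro y hy
            rw [PySem.Set.mem_add]
            rintro (hyu | rfl)
            · exact (hu y (List.mem_cons_of_mem _ hy)) hyu
            · rw [← hxc] at *
              exact (List.nodup_cons.mp hnd).1 hy
          rw [ht, hxc, hm0]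
    case isFalse hl =>
      cases m with
      | nil => simp at h
      | cons m0 mt => simp at h

lemma backtrack_cons (ps : List Int) (rest : List (List Int)) (used : PySem.Set Int) :
    backtrack (ps :: rest) used
      = ps.flatMap (fun c => if PySem.Set.contains used c then []
          else (backtrack rest (PySem.Set.add used c)).map (fun t => c :: t)) := by
  show ps.foldl _ [] = _
  rw [PySem.List.foldl_congr_mem
        (g := fun acc c => acc ++ (if PySem.Set.contains used c then []
            else (backtrack rest (PySem.Set.add used c)).map (fun t => c :: t)))]
  · rw [PySem.List.foldl_append_eq_flatMap]; simp
  · intro acc c _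
    by_cases h : c ∈ used <;> simp [h]

lemma mem_backtrack : ∀ (poss : List (List Int)) (used : PySem.Set Int) (p : List Int),
    p ∈ backtrack poss used ↔
      List.Forall₂ (fun c ps => c ∈ ps) p poss ∧ p.Nodup ∧ ∀ x ∈ p, x ∉ used := by
  intro poss
  induction poss with
  | nil =>
    intro used p
    constructor
    · intro h
      simp [backtrack] at h
      subst h
      simp [List.forall₂_nil_right_iff]
    · rintro ⟨hf, -, -⟩
      rw [List.forall₂_nil_right_iff] at hf
      simp [backtrack, hf]
  | cons ps rest ih =>
    intro used p
    rw [backtrack_cons, List.mem_flatMap]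
    constructor
    · rintro ⟨c, hc, hp⟩
      by_cases h : c ∈ used
      · simp [h] at hp
      · rw [if_neg (by simpa [PySem.Set.contains_iff] using h)] at hp
        rw [List.mem_map] at hp
        obtain ⟨t, ht, rfl⟩ := hp
        obtain ⟨hf, hnd, hu⟩ := (ih _ t).mp ht
        refine ⟨List.Forall₂.cons hc hf, ?_, ?_⟩
        · refine List.Nodup.cons ?_ hnd
          intro hct
          exact (hu c hct) (by rw [PySem.Set.mem_add]; right; rfl)
        · intro x hx
          rcases List.mem_cons.mp hx with rfl | hx
          · exact h
          · intro hxu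
            exact (hu x hx) (by rw [PySem.Set.mem_add]; left; exact hxu)
    · rintro ⟨hf, hnd, hu⟩
      cases hf with
      | cons hc hf' =>
        rename_i c t
        have hcu : c ∉ used := hu c List.mem_cons_self
        refine ⟨c, hc, ?_⟩
        rw [if_neg (by simpa [PySem.Set.contains_iff] using hcu)]
        rw [List.mem_map]
        refine ⟨t, ?_, rfl⟩
        refine (ih _ t).mpr ⟨hf', (List.nodup_cons.mp hnd).2, ?_⟩
        intro x hx
        rw [PySem.Set.mem_add]
        rintro (hxu | rfl)
        · exact (hu x (List.mem_cons_of_mem _ hx)) hxu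
        · exact (List.nodup_cons.mp hnd).1 hx

lemma mem_prodAll : ∀ (poss : List (List Int)) (p : List Int),
    p ∈ prodAll poss ↔ List.Forall₂ (fun c ps => c ∈ ps) p poss := by
  intro poss
  induction poss with
  | nil => intro p; simp [prodAll, List.forall₂_nil_right_iff]
  | cons ps rest ih =>
    intro p
    simp only [prodAll, List.mem_flatMap, List.mem_map]
    constructor
    · rintro ⟨c, hc, t, ht, rfl⟩
      exact List.Forall₂.cons hc ((ih t).mp ht)
    · intro h
      cases h with
      | cons hc ht => exact ⟨_, hc, _, (ih _).mpr ht, rfl⟩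

lemma setLen_iff (p : List Int) : ((PySem.Set.ofList p).length = p.length) ↔ p.Nodup := by
  constructor
  · intro h
    have h1 : (PySem.Set.ofList p).toFinset = p.toFinset := by
      ext x; simp [List.mem_toFinset, PySem.Set.mem_ofList]
    have h2 := List.toFinset_card_of_nodup (PySem.Set.nodup_ofList p)
    have h3 : p.toFinset.card = p.length := by rw [← h1, h2, h]
    have h4 : p.dedup.length = p.length := by
      rw [List.card_toFinset] at h3; exact h3
    have h5 : p.dedup = p := (List.dedup_sublist p).eq_of_length h4
    exact List.dedup_eq_self.mp h5
  · intro h; rw [PySem.Set.ofList_eq_self_of_nodup p h]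

lemma all_some {α : Type} (l : List (Option α)) (h : l.all (fun o => o.isSome) = true) :
    l = (l.filterMap (fun o => o)).map some := by
  induction l with
  | nil => rfl
  | cons a t ih =>
    simp only [List.all_cons, Bool.and_eq_true] at h
    obtain ⟨ha, ht⟩ := h
    rcases a with _ | v
    · exact Bool.noConfusion ha
    · simp only [List.filterMap_cons, List.map_cons, List.cons.injEq]
      exact ⟨trivial, ih ht⟩

lemma buildPossible_some (sig2 : List (PySem.Dict Int Int)) :
    ∀ (sigs : List (PySem.Dict Int Int)) (poss : List (List Int)),
    buildPossible sig2 sigs = some poss → poss = sigs.map (positions sig2) := by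
  intro sigs
  induction sigs with
  | nil => intro poss h; simp [buildPossible] at h; simp [h.symm]
  | cons s rest ih =>
    intro poss h
    rw [buildPossible] at h
    split at h
    · simp at h
    · rcases Option.map_eq_some_iff.mp h with ⟨ls, hls, rfl⟩
      rw [List.map_cons, ih ls hls]

lemma buildPossible_none (sig2 : List (PySem.Dict Int Int)) :
    ∀ (sigs : List (PySem.Dict Int Int)),
    buildPossible sig2 sigs = none → ∃ s ∈ sigs, positions sig2 s = [] := by
  intro sigs
  induction sigs with
  | nil => intro h; simp [buildPossible] at h
  | cons s rest ih =>
    intro h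
    rw [buildPossible] at h
    split at h
    case isTrue he => exact ⟨s, List.mem_cons_self, List.isEmpty_iff.mp he⟩
    case isFalse he =>
      rcases Option.map_eq_none_iff.mp h with hnone
      rcases ih hnone with ⟨s', hs', he'⟩
      exact ⟨s', List.mem_cons_of_mem _ hs', he'⟩

lemma core (sig1 sig2 : List (PySem.Dict Int Int)) (ok : List Int → Bool) (n : Int)
    (hn : (sig1.length : Int) = n) :
    (match greedy_match_by_signature sig1 sig2 with
     | some m => ok m
     | none => (generate_candidate_perms sig1 sig2).any ok)
    = (prodAll (sig1.map (positions sig2))).any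
        (fun p => (((PySem.Set.ofList p).length : Int) == n) && ok p) := by
  set poss := sig1.map (positions sig2) with hposs
  -- the right-hand side as an existence statement
  have hB : ((prodAll poss).any (fun p => (((PySem.Set.ofList p).length : Int) == n) && ok p) = true)
      ↔ ∃ p, List.Forall₂ (fun c ps => c ∈ ps) p poss ∧ p.Nodup ∧ ok p = true := by
    rw [List.any_eq_true]
    constructor
    · rintro ⟨p, hp, hf⟩
      rw [Bool.and_eq_true] at hf
      obtain ⟨hlen, hok⟩ := hf
      have hmem := (mem_prodAll poss p).mp hp
      have hplen : p.length = sig1.length := by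
        rw [hmem.length_eq, hposs, List.length_map]
      have hnd : p.Nodup := by
        rw [← setLen_iff]
        have := beq_iff_eq.mp hlen
        omega
      exact ⟨p, hmem, hnd, hok⟩
    · rintro ⟨p, hmem, hnd, hok⟩
      refine ⟨p, (mem_prodAll poss p).mpr hmem, ?_⟩
      rw [Bool.and_eq_true]
      refine ⟨?_, hok⟩
      have hplen : p.length = sig1.length := by
        rw [hmem.length_eq, hposs, List.length_map]
      rw [beq_iff_eq, (setLen_iff p).mpr hnd, hplen]
      exact hn
  rw [greedy_eq_grM]
  dsimp only
  by_cases hall : ((grM (sig1.map (positions sig2)) PySem.Set.empty).1.all fun o => o.isSome) = true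
  · rw [if_pos hall]
    have hrep := all_some _ hall
    set m := (grM (sig1.map (positions sig2)) PySem.Set.empty).1.filterMap (fun o => o) with hm
    show ok m = _
    rw [Bool.eq_iff_iff]
    constructor
    · intro hok
      obtain ⟨hf, hnd, -⟩ := grM_sound (sig1.map (positions sig2)) PySem.Set.empty m hrep
      exact hB.mpr ⟨m, hf, hnd, hok⟩
    · intro hany
      obtain ⟨p, hf, hnd, hok⟩ := hB.mp hany
      have : p = m := grM_unique (sig1.map (positions sig2)) PySem.Set.empty m hrep p hf hnd
        (by intro x hx; simp [PySem.Set.empty])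
      rw [← this]; exact hok
  · rw [if_neg hall]
    show (generate_candidate_perms sig1 sig2).any ok = _
    rw [generate_candidate_perms]
    rcases hbp : buildPossible sig2 sig1 with _ | poss'
    · -- some candidate list is empty: no signature-consistent permutation exists
      rw [Bool.eq_iff_iff]
      simp only [List.any_nil, Bool.false_eq_true, false_iff]
      intro hany
      obtain ⟨p, hf, -, -⟩ := hB.mp hany
      obtain ⟨s, hs, hps⟩ := buildPossible_none sig2 sig1 hbp
      obtain ⟨i, hi, rfl⟩ := List.mem_iff_getElem.mp hs
      simp only [hposs] at hf
      obtain ⟨hlen2, hget⟩ := List.forall₂_iff_get.mp hf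
      have hip : i < p.length := by
        rw [hlen2, List.length_map]; exact hi
      have h2 := hget i hip (by rw [List.length_map]; exact hi)
      simp only [List.get_eq_getElem, List.getElem_map] at h2
      rw [hps] at h2
      simp at h2
    · rw [buildPossible_some sig2 sig1 poss' hbp, ← hposs]
      rw [Bool.eq_iff_iff, List.any_eq_true, hB]
      constructor
      · rintro ⟨p, hp, hok⟩
        obtain ⟨hf, hnd, -⟩ := (mem_backtrack poss PySem.Set.empty p).mp hp
        exact ⟨p, hf, hnd, hok⟩
      · rintro ⟨p, hf, hnd, hok⟩
        refine ⟨p, (mem_backtrack poss PySem.Set.empty p).mpr ⟨hf, hnd, ?_⟩, hok⟩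
        intro x hx
        simp [PySem.Set.empty]
def gOf (possible : List (List Int)) (ps : List Int) : List Int :=
  ((PySem.List.enumerate possible).filter (fun q => q.2 == ps)).map (·.1)

lemma enum_map_snd {α : Type} : ∀ (xs : List α) (k : Int),
    (PySem.List.enumerate xs k).map Prod.snd = xs := by
  intro xs
  induction xs with
  | nil => intro k; rfl
  | cons x t ih => intro k; simp [PySem.List.enumerate, ih]

lemma enum_fst_ge {α : Type} : ∀ (xs : List α) (k : Int) (j : Int),
    j ∈ (PySem.List.enumerate xs k).map Prod.fst → k ≤ j := by
  intro xs
  induction xs with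
  | nil => intro k j h; simp [PySem.List.enumerate] at h
  | cons x t ih =>
    intro k j h
    rw [show PySem.List.enumerate (x :: t) k = (k, x) :: PySem.List.enumerate t (k+1) from rfl] at h
    rcases List.mem_cons.mp h with h | h
    · omega
    · have := ih (k+1) j (by simpa using h)
      omega

lemma enum_fst_nodup {α : Type} : ∀ (xs : List α) (k : Int),
    ((PySem.List.enumerate xs k).map Prod.fst).Nodup := by
  intro xs
  induction xs with
  | nil => intro k; simp [PySem.List.enumerate]
  | cons x t ih =>
    intro k
    rw [show PySem.List.enumerate (x :: t) k = (k, x) :: PySem.List.enumerate t (k+1) from rfl]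
    rw [List.map_cons]
    refine List.nodup_cons.mpr ⟨?_, ih (k+1)⟩
    intro hmem
    have := enum_fst_ge t (k+1) k hmem
    omega

lemma mem_enum {α : Type} : ∀ (xs : List α) (k : Int) (j : Int) (x : α),
    ((j, x) ∈ PySem.List.enumerate xs k) ↔ ∃ (m : Nat) (hm : m < xs.length), j = k + m ∧ xs[m] = x := by
  intro xs
  induction xs with
  | nil => intro k j x; simp [PySem.List.enumerate]
  | cons y t ih =>
    intro k j x
    rw [show PySem.List.enumerate (y :: t) k = (k, y) :: PySem.List.enumerate t (k+1) from rfl]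
    rw [List.mem_cons, ih (k+1)]
    constructor
    · rintro (h | ⟨m, hm, h1, h2⟩)
      · refine ⟨0, by simp, ?_, ?_⟩
        · simpa using congrArg Prod.fst h
        · simpa using (congrArg Prod.snd h).symm
      · exact ⟨m+1, by simpa using hm, by push_cast; omega, by simpa using h2⟩
    · rintro ⟨m, hm, h1, h2⟩
      cases m with
      | zero =>
        left
        obtain rfl : y = x := by simpa using h2
        simp only [Nat.cast_zero, add_zero] at h1
        simp [h1]
      | succ m' =>
        right
        exact ⟨m', by simpa using hm, by push_cast at h1 ⊢; omega, by simpa using h2⟩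

lemma mem_gOf (possible : List (List Int)) (ps : List Int) (i : Int) :
    i ∈ gOf possible ps ↔ ∃ (m : Nat) (hm : m < possible.length), i = (m : Int) ∧ possible[m] = ps := by
  rw [gOf, List.mem_map]
  constructor
  · rintro ⟨q, hq, rfl⟩
    rcases List.mem_filter.mp hq with ⟨hmem, hbeq⟩
    obtain ⟨m, hm, h1, h2⟩ := (mem_enum possible 0 q.1 q.2).mp hmem
    refine ⟨m, hm, by omega, ?_⟩
    rw [h2]
    exact (beq_iff_eq.mp hbeq)
  · rintro ⟨m, hm, rfl, hps⟩
    refine ⟨((m : Int), ps), ?_, rfl⟩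
    rw [List.mem_filter]
    refine ⟨(mem_enum possible 0 (m:Int) ps).mpr ⟨m, hm, by omega, hps⟩, by simp⟩

lemma gOf_nodup (possible : List (List Int)) (ps : List Int) : (gOf possible ps).Nodup := by
  have hsub : List.Sublist (gOf possible ps) ((PySem.List.enumerate possible).map Prod.fst) :=
    List.Sublist.map _ List.filter_sublist
  exact (enum_fst_nodup possible 0).sublist hsub

lemma positions_nodup (sig2 : List (PySem.Dict Int Int)) (s : PySem.Dict Int Int) :
    (positions sig2 s).Nodup := by
  rw [positions, PySem.List.foldl_append_if (p := fun q => dictEq q.2 s) (f := Prod.fst), List.nil_append]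
  have hsub : List.Sublist (((PySem.List.enumerate sig2).filter (fun q => dictEq q.2 s)).map Prod.fst)
      ((PySem.List.enumerate sig2).map Prod.fst) :=
    List.Sublist.map _ List.filter_sublist
  exact (enum_fst_nodup sig2 0).sublist hsub

lemma items_groups (possible : List (List Int)) :
    ((PySem.List.enumerate possible).foldl
        (fun d q => d.modify q.2 [] (fun v => v ++ [q.1])) PySem.Dict.empty).items
    = (PySem.Set.ofList possible).map (fun ps => (ps, gOf possible ps)) := by
  set L := PySem.List.enumerate possible with hL
  set d := L.foldl (fun d q => d.modify q.2 [] (fun v => v ++ [q.1])) (PySem.Dict.empty : PySem.Dict (List Int) (List Int)) with hd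
  have hkeys : d.keys = PySem.Set.ofList possible := by
    rw [hd, PySem.Dict.keys_foldl_modify_key L Prod.snd [] (fun _ q v => v ++ [q.1])]
    rw [PySem.Dict.keys_empty, enum_map_snd]
    rw [PySem.Set.ofList_eq_foldl]
    rfl
  have hnodup : d.keys.Nodup := by
    rw [hd]
    exact PySem.Dict.nodup_keys_foldl_modify_key L Prod.snd [] (fun _ q v => v ++ [q.1]) _ PySem.Dict.nodup_keys_empty
  have hgetD : ∀ ps, d.getD ps [] = gOf possible ps := by
    intro ps
    have hswap : d = (L.map Prod.swap).foldl
        (fun d p => d.modify p.1 [] (fun v => v ++ [p.2])) PySem.Dict.empty := by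
      rw [List.foldl_map]
      rfl
    rw [hswap, PySem.Dict.getD_foldl_modify_append, PySem.Dict.getD_empty, List.nil_append]
    rw [gOf, ← hL]
    rw [List.filter_map, List.map_map]
    apply List.map_congr_left; intro q _; rfl
  rw [PySem.Dict.items_eq_map_keys d hnodup [], hkeys]
  apply List.map_congr_left
  intro ps _
  rw [hgetD]

lemma perm_mem_permutations : ∀ (q ps : List Int), ps.Nodup → q.Perm ps →
    q ∈ PySem.List.permutations ps ps.length := by
  intro q
  induction q with
  | nil =>
    intro ps _ h
    rw [(List.Perm.nil_eq h).symm]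
    simp [PySem.List.permutations_zero]
  | cons c q' ih =>
    intro ps hnd h
    have hc : c ∈ ps := h.mem_iff.mp List.mem_cons_self
    have hlen : ps.length = q'.length + 1 := by
      rw [← h.length_eq]; rfl
    rw [hlen, PySem.List.permutations_succ, List.mem_flatMap]
    refine ⟨ps.idxOf c, by rw [List.mem_range]; exact List.idxOf_lt_length_of_mem hc, ?_⟩
    have hget : ps[ps.idxOf c]? = some c := by
      rw [List.getElem?_eq_getElem (List.idxOf_lt_length_of_mem hc)]
      simp [List.getElem_idxOf]
    rw [hget]
    rw [List.mem_map]
    refine ⟨q', ?_, rfl⟩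
    have herase : ps.eraseIdx (ps.idxOf c) = ps.erase c := by
      exact List.eraseIdx_idxOf_eq_erase c ps
    have hq' : q'.Perm (ps.erase c) := (List.cons_perm_iff_perm_erase.mp h).2
    have hlen2 : (ps.erase c).length = q'.length := by
      rw [hq'.length_eq]
    rw [herase, ← hlen2]
    exact ih (ps.erase c) (hnd.erase c) hq'

lemma foldl_set_length : ∀ (L : List (Int × Int)) (init : List Int),
    (L.foldl (fun a p => a.set p.1.toNat p.2) init).length = init.length := by
  intro L
  induction L with
  | nil => intro init; rfl
  | cons p t ih => intro init; rw [List.foldl_cons, ih, List.length_set]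

lemma foldl_set_untouched : ∀ (L : List (Int × Int)) (init : List Int) (i : Nat),
    (∀ p ∈ L, p.1.toNat ≠ i) →
    (L.foldl (fun a p => a.set p.1.toNat p.2) init)[i]? = init[i]? := by
  intro L
  induction L with
  | nil => intro init i _; rfl
  | cons p t ih =>
    intro init i h
    rw [List.foldl_cons, ih _ _ (fun q hq => h q (List.mem_cons_of_mem _ hq))]
    exact List.getElem?_set_ne (h p List.mem_cons_self)

lemma foldl_set_touched : ∀ (L : List (Int × Int)) (init : List Int) (i j : Int),
    (L.map (fun p => p.1.toNat)).Nodup → (i, j) ∈ L → i.toNat < init.length →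
    (L.foldl (fun a p => a.set p.1.toNat p.2) init)[i.toNat]? = some j := by
  intro L
  induction L with
  | nil => intro init i j _ h _; simp at h
  | cons p t ih =>
    intro init i j hnd hmem hlt
    rw [List.map_cons] at hnd
    rcases List.mem_cons.mp hmem with rfl | hmem'
    · rw [List.foldl_cons]
      rw [foldl_set_untouched t _ _ (fun q hq => by
        intro heq
        exact (List.nodup_cons.mp hnd).1 (heq ▸ List.mem_map_of_mem hq))]
      exact List.getElem?_set_self hlt
    · rw [List.foldl_cons]
      exact ih _ i j (List.nodup_cons.mp hnd).2 hmem' (by rw [List.length_set]; exact hlt)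

lemma extend_perm (ps t : List Int) (hndt : t.Nodup) (hsub : ∀ x ∈ t, x ∈ ps) (hndps : ps.Nodup) :
    (t ++ ps.filter (fun x => !(t.contains x))).Perm ps := by
  have hndf : (ps.filter (fun x => !(t.contains x))).Nodup := hndps.filter _
  have hnda : (t ++ ps.filter (fun x => !(t.contains x))).Nodup := by
    refine List.Nodup.append hndt hndf ?_
    intro x hx hxf
    rcases List.mem_filter.mp hxf with ⟨-, hnx⟩
    simp at hnx
    exact hnx hx
  rw [List.perm_ext_iff_of_nodup hnda hndps]
  intro a
  rw [List.mem_append, List.mem_filter]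
  constructor
  · rintro (h | ⟨h, -⟩)
    · exact hsub a h
    · exact h
  · intro h
    by_cases ha : a ∈ t
    · left; exact ha
    · right; exact ⟨h, by simpa using ha⟩

lemma nodup_subset_length_le (t s : List Int) (h1 : t.Nodup) (h2 : ∀ x ∈ t, x ∈ s) :
    t.length ≤ s.length := by
  calc t.length = t.toFinset.card := (List.toFinset_card_of_nodup h1).symm
    _ ≤ s.toFinset.card := Finset.card_le_card (fun x hx => by
        rw [List.mem_toFinset] at *; exact h2 x hx)
    _ ≤ s.length := s.toFinset_card_le

def buildF (perm : List Int) (tail : List (List Int × List Int)) (choice : List (List Int)) : List Int :=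
  (tail.zip choice).foldl
    (fun a ic => (ic.1.2.zip ic.2).foldl (fun a ij => a.set ij.1.toNat ij.2) a) perm

lemma buildF_length (tail : List (List Int × List Int)) :
    ∀ (choice : List (List Int)) (perm : List Int),
    (buildF perm tail choice).length = perm.length := by
  induction tail with
  | nil => intro choice perm; rfl
  | cons it rest ih =>
    intro choice perm
    cases choice with
    | nil => rfl
    | cons a c' =>
      show (buildF ((it.2.zip a).foldl (fun a ij => a.set ij.1.toNat ij.2) perm) rest c').length = _
      rw [ih c' _, foldl_set_length]

-- the flat list of (column index, assigned position) writes performed by buildF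

def writes (items : List (List Int × List Int)) (choice : List (List Int)) : List (Int × Int) :=
  (items.zip choice).flatMap (fun ic => ic.1.2.zip ic.2)

lemma buildF_eq_writes (tail : List (List Int × List Int)) (choice : List (List Int)) (perm : List Int) :
    buildF perm tail choice = (writes tail choice).foldl (fun a p => a.set p.1.toNat p.2) perm := by
  rw [writes, List.foldl_flatMap]
  rfl

lemma tval_nodup (possible : List (List Int)) (p : List Int) (ps : List Int)
    (hp : p.length = possible.length) (hpnd : p.Nodup) :
    ((gOf possible ps).map (fun i => p.getD i.toNat 0)).Nodup := by
  refine (gOf_nodup possible ps).map_on ?_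
  intro i hi i' hi' heq
  obtain ⟨m, hm, rfl, -⟩ := (mem_gOf possible ps i).mp hi
  obtain ⟨m', hm', rfl, -⟩ := (mem_gOf possible ps i').mp hi'
  simp only [Int.toNat_natCast] at heq
  rw [List.getD_eq_getElem p 0 (by omega), List.getD_eq_getElem p 0 (by omega)] at heq
  have := (List.Nodup.getElem_inj_iff hpnd).mp heq
  simp [this]

lemma tval_subset (possible : List (List Int)) (p : List Int) (ps : List Int)
    (hf : List.Forall₂ (fun c cs => c ∈ cs) p possible) :
    ∀ x ∈ (gOf possible ps).map (fun i => p.getD i.toNat 0), x ∈ ps := by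
  intro x hx
  obtain ⟨i, hi, rfl⟩ := List.mem_map.mp hx
  obtain ⟨m, hm, rfl, hpossm⟩ := (mem_gOf possible ps i).mp hi
  have hlen : p.length = possible.length := hf.length_eq
  obtain ⟨-, hget⟩ := List.forall₂_iff_get.mp hf
  have := hget m (by omega) hm
  simp only [List.get_eq_getElem] at this
  rw [Int.toNat_natCast, List.getD_eq_getElem p 0 (by omega)]
  rw [hpossm] at this
  exact this

lemma writes_fst_nodup (possible : List (List Int)) (choice : List (List Int))
    (hfa : List.Forall₂ (fun assigned (it : List Int × List Int) =>
        assigned ∈ PySem.List.permutations it.1 it.1.length) choice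
        ((PySem.Set.ofList possible).map (fun ps => (ps, gOf possible ps))))
    (hgd : ∀ it ∈ (PySem.Set.ofList possible).map (fun ps => (ps, gOf possible ps)),
        it.2.length ≤ it.1.length) :
    ((writes ((PySem.Set.ofList possible).map (fun ps => (ps, gOf possible ps))) choice).map
      (fun q => q.1.toNat)).Nodup := by
  set items := (PySem.Set.ofList possible).map (fun ps => (ps, gOf possible ps)) with hitems
  have hge : ∀ ic ∈ items.zip choice, ic.1.2.length ≤ ic.2.length := by
    intro ic hic
    obtain ⟨hic1, hic2⟩ := List.of_mem_zip (a := ic.1) (b := ic.2) (by simpa using hic)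
    obtain ⟨-, hzip⟩ := List.forall₂_iff_zip.mp hfa
    have hswap : (ic.2, ic.1) ∈ choice.zip items := by
      rw [← List.zip_swap items choice]
      exact List.mem_map_of_mem (by simpa using hic)
    have hperm := hzip hswap
    have hlen2 := PySem.List.length_of_mem_permutations hperm
    have := hgd ic.1 hic1
    omega
  rw [writes, List.map_flatMap]
  have hstep : ∀ ic ∈ items.zip choice,
      (ic.1.2.zip ic.2).map (fun q => q.1.toNat) = ic.1.2.map (fun i => i.toNat) := by
    intro ic hic
    have h1 : (ic.1.2.zip ic.2).map Prod.fst = ic.1.2 := List.map_fst_zip (hge ic hic)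
    calc (ic.1.2.zip ic.2).map (fun q => q.1.toNat)
        = ((ic.1.2.zip ic.2).map Prod.fst).map (fun i => i.toNat) := by
          rw [List.map_map]; rfl
      _ = ic.1.2.map (fun i => i.toNat) := by rw [h1]
  rw [List.flatMap_def, List.map_congr_left hstep]
  have hmapmap : (items.zip choice).map (fun ic => ic.1.2.map (fun i => i.toNat))
      = items.map (fun it => it.2.map (fun i => i.toNat)) := by
    have h1 : (items.zip choice).map Prod.fst = items :=
      List.map_fst_zip (by rw [hfa.length_eq])
    calc (items.zip choice).map (fun ic => ic.1.2.map (fun i => i.toNat))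
        = ((items.zip choice).map Prod.fst).map (fun it => it.2.map (fun i => i.toNat)) := by
          rw [List.map_map]; rfl
      _ = _ := by rw [h1]
  rw [hmapmap]
  rw [List.nodup_flatten]
  constructor
  · intro l hl
    obtain ⟨it, hit, rfl⟩ := List.mem_map.mp hl
    obtain ⟨ps, -, rfl⟩ := List.mem_map.mp hit
    refine (gOf_nodup possible ps).map_on ?_
    intro i hi i' hi' heq
    obtain ⟨m, hm, rfl, -⟩ := (mem_gOf possible ps i).mp hi
    obtain ⟨m', hm', rfl, -⟩ := (mem_gOf possible ps i').mp hi'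
    simp only [Int.toNat_natCast] at heq
    simp [heq]
  · rw [hitems, List.map_map, List.pairwise_map]
    have hK : (PySem.Set.ofList possible).Nodup := PySem.Set.nodup_ofList possible
    refine List.Pairwise.imp ?_ hK
    intro ps ps' hne x hx hx'
    simp only [Function.comp] at hx hx'
    obtain ⟨i, hi, rfl⟩ := List.mem_map.mp hx
    obtain ⟨i', hi', hval⟩ := List.mem_map.mp hx'
    obtain ⟨m, hm, rfl, hps⟩ := (mem_gOf possible ps i).mp hi
    obtain ⟨m', hm', rfl, hps'⟩ := (mem_gOf possible ps' i').mp hi'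
    simp only [Int.toNat_natCast] at hval
    subst hval
    exact hne (by rw [← hps, ← hps'])

lemma writes_cover (possible : List (List Int)) (choice : List (List Int))
    (hfa : List.Forall₂ (fun assigned (it : List Int × List Int) =>
        assigned ∈ PySem.List.permutations it.1 it.1.length) choice
        ((PySem.Set.ofList possible).map (fun ps => (ps, gOf possible ps))))
    (hgd : ∀ it ∈ (PySem.Set.ofList possible).map (fun ps => (ps, gOf possible ps)),
        it.2.length ≤ it.1.length)
    (m : Nat) (hm : m < possible.length) :
    ∃ (k pos : Nat) (hk : k < choice.length) (hki : k < ((PySem.Set.ofList possible).map (fun ps => (ps, gOf possible ps))).length)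
      (hpos : pos < (choice[k]'hk).length),
      (((PySem.Set.ofList possible).map (fun ps => (ps, gOf possible ps)))[k]'hki)
          = (possible[m], gOf possible (possible[m]))
      ∧ (choice[k]'hk) ∈ PySem.List.permutations (possible[m]) (possible[m]).length
      ∧ (∃ (hgp : pos < (gOf possible (possible[m])).length),
          (gOf possible (possible[m]))[pos]'hgp = (m : Int))
      ∧ ((m : Int), (choice[k]'hk)[pos]'hpos)
          ∈ writes ((PySem.Set.ofList possible).map (fun ps => (ps, gOf possible ps))) choice := by
  set K := PySem.Set.ofList possible with hK
  set items := K.map (fun ps => (ps, gOf possible ps)) with hitems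
  have hlen : choice.length = items.length := hfa.length_eq
  have hpsK : possible[m] ∈ K := by
    rw [hK, PySem.Set.mem_ofList]
    exact List.getElem_mem hm
  obtain ⟨k, hkK, hkeq⟩ := List.mem_iff_getElem.mp hpsK
  have hki : k < items.length := by rw [hitems, List.length_map]; exact hkK
  have hk : k < choice.length := by omega
  have hitemk : items[k]'hki = (possible[m], gOf possible (possible[m])) := by
    simp only [hitems, List.getElem_map]
    rw [hkeq]
  -- position of m inside its group
  have hmg : (m : Int) ∈ gOf possible (possible[m]) :=
    (mem_gOf possible (possible[m]) (m : Int)).mpr ⟨m, hm, rfl, rfl⟩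
  obtain ⟨pos, hgp, hposval⟩ := List.mem_iff_getElem.mp hmg
  -- the chosen permutation for this group
  obtain ⟨-, hget⟩ := List.forall₂_iff_get.mp hfa
  have hperm := hget k hk hki
  simp only [List.get_eq_getElem] at hperm
  rw [hitemk] at hperm
  have hclen : (choice[k]'hk).length = (possible[m]).length :=
    PySem.List.length_of_mem_permutations hperm
  have hgdk := hgd _ (List.getElem_mem hki)
  rw [hitemk] at hgdk
  have hpos : pos < (choice[k]'hk).length := by
    simp only at hgdk
    omega
  refine ⟨k, pos, hk, hki, hpos, hitemk, hperm, ⟨hgp, hposval⟩, ?_⟩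
  rw [writes, List.mem_flatMap]
  refine ⟨(items[k]'hki, choice[k]'hk), ?_, ?_⟩
  · have : (items.zip choice)[k]'(by rw [List.length_zip]; omega) = (items[k]'hki, choice[k]'hk) :=
      List.getElem_zip
    rw [← this]
    exact List.getElem_mem _
  · rw [hitemk]
    have hzp : ((gOf possible (possible[m])).zip (choice[k]'hk))[pos]'(by rw [List.length_zip]; omega)
        = ((gOf possible (possible[m]))[pos]'hgp, (choice[k]'hk)[pos]'hpos) := List.getElem_zip
    show ((m : Int), (choice[k]'hk)[pos]'hpos) ∈ (gOf possible (possible[m])).zip (choice[k]'hk)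
    rw [← hposval, ← hzp]
    exact List.getElem_mem _

def okB (rows2 : List (List Int)) (target : PySem.Dict (List Int) Int) (len_cols : Int) (perm : List Int) : Bool :=
  (((PySem.Set.ofList perm).length : Int) == len_cols) &&
    dictEq target (PySem.Dict.counter (rows2.map (fun row => perm.map (fun j => PySem.List.pyGetD row j 0))))

lemma search_iff (rows2 : List (List Int)) (target : PySem.Dict (List Int) Int) (len_cols : Int) :
    ∀ (tail : List (List Int × List Int)) (perm : List Int),
    (searchB rows2 target len_cols tail perm = true) ↔
      ∃ choice, List.Forall₂ (fun assigned (it : List Int × List Int) =>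
          assigned ∈ PySem.List.permutations it.1 it.1.length) choice tail ∧
        okB rows2 target len_cols (buildF perm tail choice) = true := by
  intro tail
  induction tail with
  | nil =>
    intro perm
    constructor
    · intro h
      exact ⟨[], List.Forall₂.nil, h⟩
    · rintro ⟨choice, hf, h⟩
      rw [List.forall₂_nil_right_iff] at hf
      subst hf
      exact h
  | cons it rest ih =>
    intro perm
    show (PySem.List.permutations it.1 it.1.length).any _ = true ↔ _
    rw [List.any_eq_true]
    constructor
    · rintro ⟨assigned, ha, hs⟩
      obtain ⟨choice', hf, hok⟩ := (ih _).mp hs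
      exact ⟨assigned :: choice', List.Forall₂.cons ha hf, hok⟩
    · rintro ⟨choice, hf, hok⟩
      cases hf with
      | cons ha hf' =>
        rename_i assigned choice'
        exact ⟨assigned, ha, (ih _).mpr ⟨choice', hf', hok⟩⟩

lemma coreB (possible rows2 : List (List Int)) (target : PySem.Dict (List Int) Int) (len_cols : Int)
    (hn : len_cols.toNat = possible.length)
    (hnd : ∀ ps ∈ possible, ps.Nodup) :
    (if (((PySem.List.enumerate possible).foldl
            (fun d q => d.modify q.2 [] (fun v => v ++ [q.1])) PySem.Dict.empty).items.any
          (fun it => decide (it.1.length < it.2.length))) then false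
     else searchB rows2 target len_cols
        (((PySem.List.enumerate possible).foldl
            (fun d q => d.modify q.2 [] (fun v => v ++ [q.1])) PySem.Dict.empty).items)
        (List.replicate len_cols.toNat 0))
    = (prodAll possible).any (okB rows2 target len_cols) := by
  rw [items_groups possible]
  set items := (PySem.Set.ofList possible).map (fun ps => (ps, gOf possible ps)) with hitems
  -- an accepted perm has length n and, via its Set length, is Nodup
  have hok_nodup : ∀ p, List.Forall₂ (fun c cs => c ∈ cs) p possible →
      okB rows2 target len_cols p = true → p.Nodup ∧ p.length = possible.length := by
    intro p hf hok
    have hplen : p.length = possible.length := hf.length_eq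
    rw [okB, Bool.and_eq_true] at hok
    have hsl := beq_iff_eq.mp hok.1
    refine ⟨?_, hplen⟩
    rw [← setLen_iff]
    omega
  by_cases hg : items.any (fun it => decide (it.1.length < it.2.length)) = true
  · rw [if_pos hg]
    symm
    rw [List.any_eq_false]
    intro p hp hok
    have hf := (mem_prodAll possible p).mp hp
    obtain ⟨hpnd, hplen⟩ := hok_nodup p hf hok
    obtain ⟨it, hit, hlt⟩ := List.any_eq_true.mp hg
    rw [hitems] at hit
    obtain ⟨ps, -, rfl⟩ := List.mem_map.mp hit
    simp only [decide_eq_true_eq] at hlt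
    -- pigeonhole: the |gOf ps| distinct values p takes on the group lie in ps
    have h1 := tval_nodup possible p ps hplen hpnd
    have h2 := tval_subset possible p ps hf
    have h3 := nodup_subset_length_le _ ps h1 h2
    rw [List.length_map] at h3
    omega
  · rw [if_neg hg]
    have hgd : ∀ it ∈ items, it.2.length ≤ it.1.length := by
      intro it hit
      have := List.any_eq_false.mp (Bool.not_eq_true _ ▸ hg) it hit
      simp only [decide_eq_true_eq] at this
      omega
    rw [Bool.eq_iff_iff]
    rw [search_iff, List.any_eq_true]
    constructor
    · -- search succeeded: the built perm is a member of prodAll possible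
      rintro ⟨choice, hfa, hok⟩
      refine ⟨buildF (List.replicate len_cols.toNat 0) items choice, ?_, hok⟩
      rw [mem_prodAll]
      rw [List.forall₂_iff_get]
      have hblen : (buildF (List.replicate len_cols.toNat 0) items choice).length = possible.length := by
        rw [buildF_length, List.length_replicate, hn]
      refine ⟨hblen, ?_⟩
      intro m h1 h2
      simp only [List.get_eq_getElem]
      obtain ⟨k, pos, hk, hki, hpos, hitemk, hperm, ⟨hgp, hposval⟩, hwmem⟩ :=
        writes_cover possible choice hfa hgd m h2
      have hval := foldl_set_touched _ (List.replicate len_cols.toNat 0) (m : Int) _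
        (writes_fst_nodup possible choice hfa hgd) hwmem
        (by rw [List.length_replicate]; simp; omega)
      rw [← buildF_eq_writes] at hval
      have : (buildF (List.replicate len_cols.toNat 0) items choice)[(m : Int).toNat]?
          = some ((choice[k]'hk)[pos]'hpos) := hval
      rw [List.getElem?_eq_getElem (by simp; omega)] at this
      simp only [Int.toNat_natCast] at this
      have hgetm : (buildF (List.replicate len_cols.toNat 0) items choice)[m]'h1
          = (choice[k]'hk)[pos]'hpos := by
        exact Option.some.inj this
      rw [hgetm]
      -- the assigned value lies in the group's candidate list possible[m]
      have hj : (choice[k]'hk)[pos]'hpos ∈ choice[k]'hk := List.getElem_mem hpos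
      exact (PySem.List.perm_of_mem_permutations hperm).mem_iff.mp hj
    · -- a valid perm p yields a choice whose built perm is exactly p
      rintro ⟨p, hp, hok⟩
      have hf := (mem_prodAll possible p).mp hp
      obtain ⟨hpnd, hplen⟩ := hok_nodup p hf hok
      set f : List Int × List Int → List Int := fun it =>
        (it.2.map (fun i => p.getD i.toNat 0)) ++
          it.1.filter (fun x => !((it.2.map (fun i => p.getD i.toNat 0)).contains x)) with hfdef
      set choice := items.map f with hchoice
      have hfa : List.Forall₂ (fun assigned (it : List Int × List Int) =>
          assigned ∈ PySem.List.permutations it.1 it.1.length) choice items := by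
        rw [hchoice, List.forall₂_map_left_iff, List.forall₂_same]
        intro it hit
        rw [hitems] at hit
        obtain ⟨ps, hpsK, rfl⟩ := List.mem_map.mp hit
        have hpsmem : ps ∈ possible := (PySem.Set.mem_ofList possible ps).mp hpsK
        refine perm_mem_permutations _ ps (hnd ps hpsmem) ?_
        exact extend_perm ps _ (tval_nodup possible p ps hplen hpnd)
          (tval_subset possible p ps hf) (hnd ps hpsmem)
      refine ⟨choice, hfa, ?_⟩
      have hbuild : buildF (List.replicate len_cols.toNat 0) items choice = p := by
        apply List.ext_getElem?
        intro m
        by_cases hmn : m < possible.length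
        · obtain ⟨k, pos, hk, hki, hpos, hitemk, hperm, ⟨hgp, hposval⟩, hwmem⟩ :=
            writes_cover possible choice hfa hgd m hmn
          have hval := foldl_set_touched _ (List.replicate len_cols.toNat 0) (m : Int) _
            (writes_fst_nodup possible choice hfa hgd) hwmem
            (by rw [List.length_replicate]; simp; omega)
          rw [← buildF_eq_writes] at hval
          simp only [Int.toNat_natCast] at hval
          rw [hval]
          -- compute the value assigned at position pos of group k
          have hck : choice[k]'hk = f (items[k]'hki) := by
            simp only [hchoice, List.getElem_map]
          have hfval : f (items[k]'hki)
              = (gOf possible (possible[m])).map (fun i => p.getD i.toNat 0) ++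
                (possible[m]).filter (fun x =>
                  !(((gOf possible (possible[m])).map (fun i => p.getD i.toNat 0)).contains x)) := by
            rw [hitemk]
          have hposlt : pos < ((gOf possible (possible[m])).map (fun i => p.getD i.toNat 0)).length := by
            rw [List.length_map]; exact hgp
          have hchk : (choice[k]'hk)[pos]'hpos = p[m]'(by omega) := by
            have h1 : (choice[k]'hk)[pos]'hpos
                = (((gOf possible (possible[m])).map (fun i => p.getD i.toNat 0)) ++
                    (possible[m]).filter (fun x =>
                      !(((gOf possible (possible[m])).map (fun i => p.getD i.toNat 0)).contains x)))[pos]'(by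
                        rw [List.length_append]; omega) := by
              congr 1
              rw [hck, hfval]
            rw [h1, List.getElem_append_left hposlt, List.getElem_map]
            rw [hposval]
            simp only [Int.toNat_natCast]
            exact List.getD_eq_getElem p 0 (by omega)
          rw [hchk, List.getElem?_eq_getElem (by omega : m < p.length)]
        · rw [List.getElem?_eq_none, List.getElem?_eq_none]
          · omega
          · rw [buildF_length, List.length_replicate]; omega
      rw [hbuild]
      exact hok

-- ===== VERDICT (by name: the statement is the Claim_ definition above) =====
theorem table_equivalent_spec : Claim_equal_table_equivalent := by
  intro rows1 rows2 _hdom _hpre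
  unfold Spec_table_equivalent
  unfold table_equivalent table_equivalent_alt
  dsimp only
  have hn : (((PySem.List.pyRange 0 ((rows1.headD []).length : Int)).map
      (fun idx => PySem.Dict.counter (rows1.map (fun row => PySem.List.pyGetD row idx 0)))).length : Int)
      = ((rows1.headD []).length : Int) := by
    rw [PySem.List.pyRange_zero_natCast]; simp
  have hB := coreB (((PySem.List.pyRange 0 ((rows1.headD []).length : Int)).map
          (fun idx => PySem.Dict.counter (rows1.map (fun row => PySem.List.pyGetD row idx 0)))).map
          (fun s => positions ((PySem.List.pyRange 0 ((rows1.headD []).length : Int)).map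
            (fun idx => PySem.Dict.counter (rows2.map (fun row => PySem.List.pyGetD row idx 0)))) s))
      rows2 (PySem.Dict.counter rows1) ((rows1.headD []).length : Int)
      (by rw [List.length_map, PySem.List.pyRange_zero_natCast]; simp) (fun ps hps => by
        obtain ⟨s, -, rfl⟩ := List.mem_map.mp hps
        exact positions_nodup _ s)
  split_ifs with h1 h2 h3 h4 h5 h6
  · rfl
  · rfl
  · rfl
  · rfl
  · rfl
  · simp only [column_signature]
    rw [core _ _ _ _ hn]
    rw [if_pos h6] at hB
    rw [hB]
    rfl
  · simp only [column_signature]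
    rw [core _ _ _ _ hn]
    rw [if_neg h6] at hB
    rw [hB]
    rfl
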